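-- pv_equiv track=rewrite | github.com/eccho03/coding-test | 백준/Gold/13549. 숨바꼭질 3/숨바꼭질 3.py | bfs
-- ===== SOURCE A (Python) =====
-- from collections import deque
--
-- def bfs(start, end):
--     q = deque()
--     v = [-1] * 100001
--
--     q.append((start, 0))
--     v[start] = 0
--
--     while q:
--         cur, cnt = q.popleft()
--         if cur == end:
--             return cnt
--
--         # 순간이동: 0초
--         if 0 <= cur*2 <= 100000 and v[cur*2] == -1:
--             q.appendleft((cur*2, cnt))
--             v[cur*2] = cnt
--
--         # 일반 이동: 1초
--         for n in (cur-1, cur+1):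
--             if 0 <= n <= 100000 and v[n] == -1:
--                 q.append((n, cnt + 1))
--                 v[n] = cnt+1
--
--     return 0
-- ===== SOURCE B (Python) =====
-- def bfs(start, end):
--     # Layered search: a stack of nodes reachable in exactly t seconds (free
--     # doublings stay in the current layer) and a list for the t+1 layer; no
--     # queue of (node, time) pairs and no stored distances, only seen-flags.
--     # Reports the target the moment it is first discovered.
--     if start == end:
--         return 0
--     seen = [False] * 100001
--     seen[start] = True
--     t = 0
--     layer = [start]   # nodes at time t, newest on top
--     nxt = []          # nodes discovered for time t + 1, oldest first
--     while layer or nxt: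
--         if not layer:
--             layer = nxt[::-1]
--             nxt = []
--             t += 1
--         cur = layer.pop()
--         dbl = cur * 2
--         if 0 <= dbl <= 100000 and not seen[dbl]:
--             if dbl == end:
--                 return t
--             seen[dbl] = True
--             layer.append(dbl)
--         for n in (cur - 1, cur + 1):
--             if 0 <= n <= 100000 and not seen[n]:
--                 if n == end:
--                     return t + 1
--                 seen[n] = True
--                 nxt.append(n)
--     return 0
-- ===== Notes on version B (the rewrite author's own statement) =====
-- stated objective: alternative
-- what changed: Replaces the deque of (node, time) pairs with a layered search: a stack of the current time-layer (0-cost doublings stay in it), a list collecting the next layer, a single layer counter instead of per-entry times, boolean seen-flags instead of a distance array, and an early return the moment the target is first discovered rather than when it is popped.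
-- outside the precondition, e.g. on bfs(-1, 3): A returns 3, B returns 3; on bfs(100001, 0): A raises IndexError, B raises IndexError
import Mathlib
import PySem

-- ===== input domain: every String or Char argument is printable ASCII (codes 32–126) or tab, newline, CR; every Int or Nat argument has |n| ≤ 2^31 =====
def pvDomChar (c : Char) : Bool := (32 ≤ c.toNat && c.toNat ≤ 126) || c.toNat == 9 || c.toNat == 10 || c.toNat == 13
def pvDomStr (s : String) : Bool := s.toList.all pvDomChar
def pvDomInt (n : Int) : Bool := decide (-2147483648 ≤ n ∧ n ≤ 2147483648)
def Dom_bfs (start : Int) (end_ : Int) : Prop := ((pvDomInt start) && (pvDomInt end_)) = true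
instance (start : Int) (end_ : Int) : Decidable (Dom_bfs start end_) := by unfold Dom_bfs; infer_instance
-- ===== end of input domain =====

-- B replaces A's deque of (node, time) pairs by a layered search (current-layer
-- stack + next-layer list + one time counter, seen-flags instead of stored
-- distances, early return on first discovery of the target): an alternative
-- decomposition of the same cost, proved to return A's exact value.

-- ===== PORT A =====
-- Python list index (negative indices count from the end of the 100001-cell array)
def pvIdx (i : Int) : Nat := (if i < 0 then i + 100001 else i).toNat
-- v[i] read / write on the 100001-cell visited/time array (in-bounds on every admitted input)
def vGet (v : Array Int) (i : Int) : Int := v.getD (pvIdx i) (-1)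
def vSet (v : Array Int) (i : Int) (x : Int) : Array Int := v.setIfInBounds (pvIdx i) x

-- collections.deque, ported as the standard two-list functional deque
structure DQ where
  front : List (Int × Int)
  back : List (Int × Int)    -- reversed: head = rightmost element
deriving Repr

def DQ.popLeft? : DQ → Option ((Int × Int) × DQ)
  | ⟨[], b⟩ =>
    match b.reverse with
    | [] => none
    | x :: f => some (x, ⟨f, []⟩)
  | ⟨x :: f, b⟩ => some (x, ⟨f, b⟩)

def DQ.pushLeft (q : DQ) (x : Int × Int) : DQ := ⟨x :: q.front, q.back⟩

def DQ.pushRight (q : DQ) (x : Int × Int) : DQ := ⟨q.front, x :: q.back⟩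

-- body of `for n in (cur-1, cur+1): ...` (state = (queue, v))
def pushA (cnt1 : Int) (s : DQ × Array Int) (n : Int) : DQ × Array Int :=
  if 0 ≤ n ∧ n ≤ 100000 ∧ vGet s.2 n = -1 then
    (s.1.pushRight (n, cnt1), vSet s.2 n cnt1)
  else s

-- the `while q:` loop; fuel 300005 exceeds 2*100001 + 1 steps the loop can make
def bfsLoop (end_ : Int) : Nat → DQ → Array Int → Int
  | 0, _, _ => 0
  | fuel + 1, q, v =>
    match q.popLeft? with
    | none => 0
    | some ((cur, cnt), q1) =>
      if cur = end_ then cnt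
      else
        let s1 :=
          if 0 ≤ cur * 2 ∧ cur * 2 ≤ 100000 ∧ vGet v (cur * 2) = -1 then
            (q1.pushLeft (cur * 2, cnt), vSet v (cur * 2) cnt)
          else (q1, v)
        let s2 := [cur - 1, cur + 1].foldl (pushA (cnt + 1)) s1
        bfsLoop end_ fuel s2.1 s2.2

def bfs (start : Int) (end_ : Int) : Int :=
  let v := vSet (Array.replicate 100001 (-1 : Int)) start 0
  bfsLoop end_ 300005 ⟨[(start, 0)], []⟩ v   -- q = deque([(start, 0)]) after the append

-- ===== PORT B =====
-- seen[i] read / write (list of booleans)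
def bGet (seen : Array Bool) (i : Int) : Bool := seen.getD (pvIdx i) false
def bSet (seen : Array Bool) (i : Int) : Array Bool := seen.setIfInBounds (pvIdx i) true

-- `for n in (cur-1, cur+1)` with its early return: .inr = returned time, .inl = new (nxt, seen)
def walkB (end_ : Int) (t : Int) : List Int → List Int × Array Bool → (List Int × Array Bool) ⊕ Int
  | [], s => .inl s
  | n :: rest, (nxt, seen) =>
    if 0 ≤ n ∧ n ≤ 100000 ∧ bGet seen n = false then
      if n = end_ then .inr (t + 1)
      else walkB end_ t rest (n :: nxt, bSet seen n)
    else walkB end_ t rest (nxt, seen)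

-- the `while layer or nxt:` loop (same fuel bound as A's loop)
def bfsAltLoop (end_ : Int) : Nat → Int → List Int → List Int → Array Bool → Int
  | 0, _, _, _, _ => 0
  | fuel + 1, t, layer, nxt, seen =>
    let tln : Int × List Int × List Int :=
      if layer.isEmpty then (t + 1, nxt.reverse, []) else (t, layer, nxt)
    match tln.2.1 with
    | [] => 0
    | cur :: rest =>
      let step : (List Int × Array Bool) ⊕ Int :=
        if 0 ≤ cur * 2 ∧ cur * 2 ≤ 100000 ∧ bGet seen (cur * 2) = false then
          if cur * 2 = end_ then .inr tln.1
          else .inl (cur * 2 :: rest, bSet seen (cur * 2))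
        else .inl (rest, seen)
      match step with
      | .inr r => r
      | .inl (layer2, seen2) =>
        match walkB end_ tln.1 [cur - 1, cur + 1] (tln.2.2, seen2) with
        | .inr r => r
        | .inl (nxt2, seen3) => bfsAltLoop end_ fuel tln.1 layer2 nxt2 seen3

def bfs_alt (start : Int) (end_ : Int) : Int :=
  if start = end_ then 0
  else
    let seen := bSet (Array.replicate 100001 false) start
    bfsAltLoop end_ 300005 0 [start] [] seen

-- ===== PRECONDITION & SPEC =====
-- Pre_ restricts to the problem's natural domain 0 ≤ start ≤ 100000 (the Baekjoon
-- task guarantees it): for start < -100001 or start > 100000 the Python A raises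
-- IndexError, and for -100001 ≤ start < 0 it only returns by accident of Python's
-- negative-index wraparound (B happens to agree there, but it is outside the
-- problem's domain). end is unrestricted.
def Pre_bfs (start : Int) (end_ : Int) : Prop := 0 ≤ start ∧ start ≤ 100000
instance (start : Int) (end_ : Int) : Decidable (Pre_bfs start end_) := by unfold Pre_bfs; infer_instance

def pvWitness_bfs : Int × Int := (5, 17)

def Spec_bfs (start : Int) (end_ : Int) (out : Int) : Prop := out = bfs_alt start end_
instance (start : Int) (end_ : Int) (out : Int) : Decidable (Spec_bfs start end_ out) := by unfold Spec_bfs; infer_instance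

-- ===== CLAIM (what is proved, stated in full; the proofs are below) =====
def Claim_equal_bfs : Prop := ∀ (start : Int) (end_ : Int), Dom_bfs start end_ → Pre_bfs start end_ → Spec_bfs start end_ (bfs start end_)

-- ===== LEMMAS AND PROOFS =====


-- Helper notions for the proofs: the board range, the deque's contents as one
-- list, the unvisited-cell count (termination/fuel measure), and the two
-- invariants tying A's state to B's.
def InR (x : Int) : Prop := 0 ≤ x ∧ x ≤ 100000

def Items (q : DQ) : List (Int × Int) := q.front ++ q.back.reverse

def unvis (v : Array Int) : Nat := v.toList.count (-1)

def InvQ (q : DQ) (v : Array Int) : Prop :=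
  ∀ p ∈ Items q, InR p.1 ∧ vGet v p.1 = p.2 ∧ 0 ≤ p.2

def FSync (v : Array Int) (seen : Array Bool) : Prop :=
  ∀ x : Int, InR x → (bGet seen x = false ↔ vGet v x = -1)

theorem pvIdx_inr {x : Int} (h : InR x) : pvIdx x = x.toNat := by
  obtain ⟨h1, h2⟩ := h; unfold pvIdx; rw [if_neg (by omega)]

theorem pvIdx_lt {x : Int} (h : InR x) : pvIdx x < 100001 := by
  have := h; obtain ⟨h1, h2⟩ := this; rw [pvIdx_inr h]; omega

theorem pvIdx_inj {x y : Int} (hx : InR x) (hy : InR y) (hne : y ≠ x) :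
    pvIdx y ≠ pvIdx x := by
  have hx' := hx; have hy' := hy
  obtain ⟨hx1, hx2⟩ := hx'; obtain ⟨hy1, hy2⟩ := hy'
  rw [pvIdx_inr hx, pvIdx_inr hy]; omega

theorem size_vSet (v : Array Int) (x a : Int) : (vSet v x a).size = v.size :=
  Array.size_setIfInBounds

theorem vGet_vSet_self {v : Array Int} {x : Int} (a : Int) (hs : v.size = 100001)
    (hx : InR x) : vGet (vSet v x a) x = a := by
  have h : pvIdx x < v.size := by rw [hs]; exact pvIdx_lt hx
  simp [vGet, vSet, Array.getD_eq_getD_getElem?, Array.getElem?_setIfInBounds, h]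

theorem vGet_vSet_ne {v : Array Int} {x y : Int} (a : Int) (hx : InR x) (hy : InR y)
    (hne : y ≠ x) : vGet (vSet v x a) y = vGet v y := by
  have hij : pvIdx x ≠ pvIdx y := Ne.symm (pvIdx_inj hx hy hne)
  simp [vGet, vSet, Array.getD_eq_getD_getElem?, Array.getElem?_setIfInBounds, hij,
    Array.getD_eq_getD_getElem?]

theorem size_bSet (seen : Array Bool) (x : Int) : (bSet seen x).size = seen.size :=
  Array.size_setIfInBounds

theorem bGet_bSet_self {seen : Array Bool} {x : Int} (hs : seen.size = 100001)
    (hx : InR x) : bGet (bSet seen x) x = true := by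
  have h : pvIdx x < seen.size := by rw [hs]; exact pvIdx_lt hx
  simp [bGet, bSet, Array.getD_eq_getD_getElem?, Array.getElem?_setIfInBounds, h]

theorem bGet_bSet_ne {seen : Array Bool} {x y : Int} (hx : InR x) (hy : InR y)
    (hne : y ≠ x) : bGet (bSet seen x) y = bGet seen y := by
  have hij : pvIdx x ≠ pvIdx y := Ne.symm (pvIdx_inj hx hy hne)
  simp [bGet, bSet, Array.getD_eq_getD_getElem?, Array.getElem?_setIfInBounds, hij]

theorem unvis_vSet {v : Array Int} {x a : Int} (hs : v.size = 100001) (hx : InR x)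
    (hv : vGet v x = -1) (ha : a ≠ -1) : unvis (vSet v x a) + 1 = unvis v := by
  have hlt : pvIdx x < v.toList.length := by
    rw [Array.length_toList, hs]; exact pvIdx_lt hx
  have hgl : v.toList[pvIdx x]'hlt = -1 := by
    have hb : pvIdx x < v.size := by rw [hs]; exact pvIdx_lt hx
    have : vGet v x = v[pvIdx x]'hb := by simp [vGet, Array.getD, hb]
    rw [this] at hv
    simpa [Array.getElem_toList] using hv
  have hmem : (-1 : Int) ∈ v.toList := hgl ▸ List.getElem_mem hlt
  have hcnt : 0 < v.toList.count (-1) := List.count_pos_iff.mpr hmem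
  unfold unvis vSet
  rw [Array.toList_setIfInBounds, List.count_set hlt]
  simp only [hgl, beq_self_eq_true, if_true, beq_iff_eq, if_neg ha]
  omega

theorem Items_pushLeft (q : DQ) (p : Int × Int) : Items (q.pushLeft p) = p :: Items q := by
  simp [Items, DQ.pushLeft]

theorem Items_pushRight (q : DQ) (p : Int × Int) : Items (q.pushRight p) = Items q ++ [p] := by
  simp [Items, DQ.pushRight]

theorem popLeft?_spec (q : DQ) :
    (q.popLeft? = none ∧ Items q = []) ∨
      ∃ p q', q.popLeft? = some (p, q') ∧ Items q = p :: Items q' := by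
  obtain ⟨f, b⟩ := q
  cases f with
  | cons x f =>
    right; exact ⟨x, ⟨f, b⟩, rfl, by simp [Items]⟩
  | nil =>
    cases hb : b.reverse with
    | nil => left; constructor <;> simp [DQ.popLeft?, Items, hb]
    | cons x f =>
      right; exact ⟨x, ⟨f, []⟩, by simp [DQ.popLeft?, hb], by simp [Items, hb]⟩


-- Marking a fresh cell keeps the queue invariant (queued items carry values ≥ 0, so
-- their cells are never rewritten).
theorem InvQ_mark {q : DQ} {v : Array Int} {x a : Int} (hq : InvQ q v)
    (_hs : v.size = 100001) (hx : InR x) (hv : vGet v x = -1) :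
    InvQ q (vSet v x a) := by
  intro p hp
  obtain ⟨h1, h2, h3⟩ := hq p hp
  refine ⟨h1, ?_, h3⟩
  have hne : p.1 ≠ x := by
    intro he; rw [he, hv] at h2; omega
  rw [vGet_vSet_ne a hx h1 hne, h2]

theorem InvQ_pushLeft {q : DQ} {v : Array Int} {x a : Int} (hq : InvQ q v)
    (hx : InR x) (hv : vGet v x = a) (ha : 0 ≤ a) :
    InvQ (q.pushLeft (x, a)) v := by
  intro p hp
  rw [Items_pushLeft] at hp
  rcases List.mem_cons.1 hp with hp | hp
  · subst hp; exact ⟨hx, hv, ha⟩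
  · exact hq p hp

theorem InvQ_pushRight {q : DQ} {v : Array Int} {x a : Int} (hq : InvQ q v)
    (hx : InR x) (hv : vGet v x = a) (ha : 0 ≤ a) :
    InvQ (q.pushRight (x, a)) v := by
  intro p hp
  rw [Items_pushRight] at hp
  rcases List.mem_append.1 hp with hp | hp
  · exact hq p hp
  · rw [List.mem_singleton.1 hp]; exact ⟨hx, hv, ha⟩

theorem FSync_mark {v : Array Int} {seen : Array Bool} {x a : Int} (hf : FSync v seen)
    (hsv : v.size = 100001) (hss : seen.size = 100001) (hx : InR x) (ha : a ≠ -1) :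
    FSync (vSet v x a) (bSet seen x) := by
  intro y hy
  by_cases he : y = x
  · subst he
    rw [bGet_bSet_self hss hy, vGet_vSet_self a hsv hy]
    simp [ha]
  · rw [bGet_bSet_ne hx hy he, vGet_vSet_ne a hx hy he]
    exact hf y hy

-- What one conditional walk push preserves, and hence the whole fold over the
-- walk candidates: sizes, the queue invariant, already-marked cells, old items,
-- and the (2·unvisited + queue length) measure.
def PresOut (s s' : DQ × Array Int) : Prop :=
  s'.2.size = s.2.size ∧
  (InvQ s.1 s.2 → InvQ s'.1 s'.2) ∧
  (∀ y : Int, InR y → vGet s.2 y ≠ -1 → vGet s'.2 y = vGet s.2 y) ∧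
  (∀ p ∈ Items s.1, p ∈ Items s'.1) ∧
  2 * unvis s'.2 + (Items s'.1).length ≤ 2 * unvis s.2 + (Items s.1).length

theorem PresOut_rfl (s : DQ × Array Int) : PresOut s s :=
  ⟨rfl, fun h => h, fun _ _ _ => rfl, fun _ h => h, le_rfl⟩

theorem PresOut_trans {s1 s2 s3 : DQ × Array Int} (h12 : PresOut s1 s2)
    (h23 : PresOut s2 s3) : PresOut s1 s3 := by
  obtain ⟨a1, b1, c1, d1, e1⟩ := h12
  obtain ⟨a2, b2, c2, d2, e2⟩ := h23
  refine ⟨a2.trans a1, fun h => b2 (b1 h), ?_, fun p hp => d2 p (d1 p hp), e2.trans e1⟩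
  intro y hy hv
  rw [c2 y hy (by rw [c1 y hy hv]; exact hv), c1 y hy hv]

theorem pushA_pres {cnt1 : Int} (h1 : 0 ≤ cnt1) (s : DQ × Array Int) (n : Int)
    (hs : s.2.size = 100001) : PresOut s (pushA cnt1 s n) := by
  unfold pushA
  by_cases hg : 0 ≤ n ∧ n ≤ 100000 ∧ vGet s.2 n = -1
  · rw [if_pos hg]
    obtain ⟨hg1, hg2, hg3⟩ := hg
    have hn : InR n := ⟨hg1, hg2⟩
    refine ⟨(size_vSet _ _ _).trans rfl, ?_, ?_, ?_, ?_⟩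
    · intro hq
      exact InvQ_pushRight (InvQ_mark hq hs hn hg3)
        hn (vGet_vSet_self cnt1 hs hn) h1
    · intro y hy hv
      have hne : y ≠ n := by intro he; rw [he, hg3] at hv; exact hv rfl
      exact vGet_vSet_ne cnt1 hn hy hne
    · intro p hp; rw [Items_pushRight]; exact List.mem_append_left _ hp
    · rw [Items_pushRight, List.length_append]
      have := unvis_vSet hs hn hg3 (by omega : cnt1 ≠ -1)
      simp only [List.length_singleton]
      omega
  · rw [if_neg hg]; exact PresOut_rfl s

theorem foldA_pres {cnt1 : Int} (h1 : 0 ≤ cnt1) :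
    ∀ (cands : List Int) (s : DQ × Array Int), s.2.size = 100001 →
      PresOut s (cands.foldl (pushA cnt1) s) := by
  intro cands
  induction cands with
  | nil => intro s _; exact PresOut_rfl s
  | cons n rest ih =>
    intro s hs
    have hstep := pushA_pres h1 s n hs
    have hs' : (pushA cnt1 s n).2.size = 100001 := by rw [hstep.1, hs]
    exact PresOut_trans hstep (by simpa using ih (pushA cnt1 s n) hs')

-- Unfolding lemmas for one iteration of A's loop.
theorem bfsLoop_none {end_ : Int} {fuel : Nat} {q : DQ} {v : Array Int}
    (h : q.popLeft? = none) : bfsLoop end_ (fuel + 1) q v = 0 := by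
  rw [bfsLoop, h]

theorem bfsLoop_pop {end_ : Int} {fuel : Nat} {q q1 : DQ} {v : Array Int}
    {cur cnt : Int} (h : q.popLeft? = some ((cur, cnt), q1)) :
    bfsLoop end_ (fuel + 1) q v =
      if cur = end_ then cnt
      else
        let s1 :=
          if 0 ≤ cur * 2 ∧ cur * 2 ≤ 100000 ∧ vGet v (cur * 2) = -1 then
            (q1.pushLeft (cur * 2, cnt), vSet v (cur * 2) cnt)
          else (q1, v)
        let s2 := [cur - 1, cur + 1].foldl (pushA (cnt + 1)) s1
        bfsLoop end_ fuel s2.1 s2.2 := by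
  rw [bfsLoop, h]

-- Once the target has been marked with value c and an entry (end_, c) sits in the
-- deque, A's loop necessarily returns c.
theorem loopA_pending (end_ : Int) (c : Int) (hc : 0 ≤ c) (hr : InR end_) :
    ∀ (fuel : Nat) (q : DQ) (v : Array Int), v.size = 100001 → InvQ q v →
      vGet v end_ = c → ((end_, c) ∈ Items q) →
      2 * unvis v + (Items q).length < fuel →
      bfsLoop end_ fuel q v = c := by
  intro fuel
  induction fuel with
  | zero =>
    intro q v _ _ _ _ hm; exact absurd hm (Nat.not_lt_zero _)
  | succ fuel ih =>
    intro q v hs hq hvend hmem hm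
    rcases popLeft?_spec q with ⟨hpop, hit⟩ | ⟨p, q', hpop, hit⟩
    · rw [hit] at hmem; exact absurd hmem (List.not_mem_nil)
    · obtain ⟨cur, cnt⟩ := p
      rw [bfsLoop_pop hpop]
      by_cases hce : cur = end_
      · rw [if_pos hce]
        have hp : vGet v cur = cnt := (hq (cur, cnt) (by rw [hit]; exact List.mem_cons_self)).2.1
        rw [hce, hvend] at hp
        omega
      · rw [if_neg hce]
        have hpq' : InvQ q' v := by
          intro p hp; exact hq p (by rw [hit]; exact List.mem_cons_of_mem _ hp)
        have hmem' : (end_, c) ∈ Items q' := by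
          rw [hit] at hmem
          rcases List.mem_cons.1 hmem with h | h
          · exact absurd (congrArg Prod.fst h).symm hce
          · exact h
        -- the teleport push
        set s1 := (if 0 ≤ cur * 2 ∧ cur * 2 ≤ 100000 ∧ vGet v (cur * 2) = -1 then
            (DQ.pushLeft q' (cur * 2, cnt), vSet v (cur * 2) cnt)
          else (q', v)) with hs1
        have hcnt0 : 0 ≤ cnt := (hq (cur, cnt) (by rw [hit]; exact List.mem_cons_self)).2.2
        have hpres1 : s1.2.size = 100001 ∧ InvQ s1.1 s1.2 ∧ vGet s1.2 end_ = c ∧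
            (end_, c) ∈ Items s1.1 ∧
            2 * unvis s1.2 + (Items s1.1).length ≤ 2 * unvis v + (Items q').length := by
          rw [hs1]
          by_cases hg : 0 ≤ cur * 2 ∧ cur * 2 ≤ 100000 ∧ vGet v (cur * 2) = -1
          · rw [if_pos hg]
            obtain ⟨hg1, hg2, hg3⟩ := hg
            have hn : InR (cur * 2) := ⟨hg1, hg2⟩
            have hne : end_ ≠ cur * 2 := by
              intro he; rw [← he, hvend] at hg3; omega
            refine ⟨(size_vSet _ _ _).trans hs, ?_, ?_, ?_, ?_⟩
            · exact InvQ_pushLeft (InvQ_mark hpq' hs hn hg3) hn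
                (vGet_vSet_self cnt hs hn) hcnt0
            · rw [vGet_vSet_ne cnt hn hr hne]; exact hvend
            · rw [Items_pushLeft]; exact List.mem_cons_of_mem _ hmem'
            · rw [Items_pushLeft]
              have := unvis_vSet hs hn hg3 (by omega : cnt ≠ -1)
              simp only [List.length_cons]
              omega
          · rw [if_neg hg]
            exact ⟨hs, hpq', hvend, hmem', le_rfl⟩
        obtain ⟨hp1, hp2, hp3, hp4, hp5⟩ := hpres1
        have hfold := foldA_pres (by omega : (0:Int) ≤ cnt + 1) [cur - 1, cur + 1] s1 hp1
        obtain ⟨hf1, hf2, hf3, hf4, hf5⟩ := hfold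
        set s2 := [cur - 1, cur + 1].foldl (pushA (cnt + 1)) s1 with hs2
        have hit' : (Items q).length = (Items q').length + 1 := by
          rw [hit, List.length_cons]
        exact ih s2.1 s2.2 (by rw [hf1, hp1]) (hf2 hp2)
          (by rw [hf3 end_ hr (by rw [hp3]; omega), hp3])
          (hf4 _ hp4) (by omega)


-- B-side unfolding helpers.
def AltRes (end_ : Int) (fuel : Nat) (t1 : Int) (layerL : List Int) :
    (List Int × Array Bool) ⊕ Int → Int
  | .inl s2 => bfsAltLoop end_ fuel t1 layerL s2.1 s2.2
  | .inr r => r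

theorem AltRes_eq (end_ : Int) (fuel : Nat) (t1 : Int) (L : List Int)
    (w : (List Int × Array Bool) ⊕ Int) :
    (match w with
      | .inr r => r
      | .inl (nxt2, seen3) => bfsAltLoop end_ fuel t1 L nxt2 seen3) =
      AltRes end_ fuel t1 L w := by
  rcases w with ⟨a, b⟩ | r <;> rfl

theorem walkB_nil (end_ t : Int) (s : List Int × Array Bool) :
    walkB end_ t [] s = .inl s := rfl

theorem walkB_cons (end_ t n : Int) (rest : List Int) (nxt : List Int) (seen : Array Bool) :
    walkB end_ t (n :: rest) (nxt, seen) =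
      if 0 ≤ n ∧ n ≤ 100000 ∧ bGet seen n = false then
        if n = end_ then .inr (t + 1) else walkB end_ t rest (n :: nxt, bSet seen n)
      else walkB end_ t rest (nxt, seen) := by
  rw [walkB]

theorem bfsAltLoop_cons (end_ : Int) (fuel : Nat) (t cur : Int) (rest nxt : List Int)
    (seen : Array Bool) :
    bfsAltLoop end_ (fuel + 1) t (cur :: rest) nxt seen =
      if 0 ≤ cur * 2 ∧ cur * 2 ≤ 100000 ∧ bGet seen (cur * 2) = false then
        if cur * 2 = end_ then t
        else AltRes end_ fuel t (cur * 2 :: rest)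
          (walkB end_ t [cur - 1, cur + 1] (nxt, bSet seen (cur * 2)))
      else AltRes end_ fuel t rest (walkB end_ t [cur - 1, cur + 1] (nxt, seen)) := by
  by_cases hg : 0 ≤ cur * 2 ∧ cur * 2 ≤ 100000 ∧ bGet seen (cur * 2) = false
  · by_cases he : cur * 2 = end_
    · simp only [bfsAltLoop, List.isEmpty_cons, if_neg Bool.false_ne_true, if_pos hg, if_pos he]
    · simp only [bfsAltLoop, List.isEmpty_cons, if_neg Bool.false_ne_true, if_pos hg, if_neg he]
      exact AltRes_eq ..
  · simp only [bfsAltLoop, List.isEmpty_cons, if_neg Bool.false_ne_true, if_neg hg]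
    exact AltRes_eq ..

theorem bfsAltLoop_promote (end_ : Int) (fuel : Nat) (t : Int) (nxt : List Int)
    (seen : Array Bool) :
    bfsAltLoop end_ (fuel + 1) t [] nxt seen =
      bfsAltLoop end_ (fuel + 1) (t + 1) nxt.reverse [] seen := by
  cases h : nxt.reverse with
  | nil => simp only [bfsAltLoop, List.isEmpty_nil, if_pos rfl, h]; rfl
  | cons c rest => simp only [bfsAltLoop, List.isEmpty_nil, if_pos rfl, h]; rfl

-- A-side rebalance: popping from ⟨[], b⟩ is popping from ⟨b.reverse, []⟩.
theorem bfsLoop_rebalance (end_ : Int) (fuel : Nat) (b : List (Int × Int)) (v : Array Int) :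
    bfsLoop end_ (fuel + 1) ⟨[], b⟩ v = bfsLoop end_ (fuel + 1) ⟨b.reverse, []⟩ v := by
  cases h : b.reverse with
  | nil =>
    rw [bfsLoop_none (by simp [DQ.popLeft?, h]), bfsLoop_none (by simp [DQ.popLeft?])]
  | cons x f =>
    obtain ⟨cur, cnt⟩ := x
    rw [bfsLoop_pop (cur := cur) (cnt := cnt) (q1 := ⟨f, []⟩) (by simp [DQ.popLeft?, h]),
      bfsLoop_pop (cur := cur) (cnt := cnt) (q1 := ⟨f, []⟩) (by simp [DQ.popLeft?])]

-- The alignment between A's deque state and B's layered state.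
def Align (end_ t1 : Int) (layerL nxtL : List Int) (v : Array Int) (seen : Array Bool) : Prop :=
  v.size = 100001 ∧ seen.size = 100001 ∧
  InvQ ⟨layerL.map (fun x => (x, t1)), nxtL.map (fun x => (x, t1 + 1))⟩ v ∧
  FSync v seen ∧ (InR end_ → vGet v end_ = -1)

theorem Items_aligned (t1 : Int) (layerL nxtL : List Int) :
    Items ⟨layerL.map (fun x => (x, t1)), nxtL.map (fun x => (x, t1 + 1))⟩ =
      layerL.map (fun x => (x, t1)) ++ (nxtL.map (fun x => (x, t1 + 1))).reverse := rfl

theorem length_Items_aligned (t1 : Int) (layerL nxtL : List Int) :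
    (Items ⟨layerL.map (fun x => (x, t1)), nxtL.map (fun x => (x, t1 + 1))⟩).length =
      layerL.length + nxtL.length := by
  simp [Items]

-- The walk over (cur-1, cur+1): A's fold against B's early-returning loop.
theorem walk_corr (end_ : Int) (fuel : Nat)
    (IH : ∀ (t : Int) (layer nxt : List Int) (v : Array Int) (seen : Array Bool),
      0 ≤ t → Align end_ t layer nxt v seen →
      2 * unvis v + layer.length + nxt.length < fuel →
      bfsLoop end_ fuel ⟨layer.map (fun x => (x, t)), nxt.map (fun x => (x, t + 1))⟩ v
        = bfsAltLoop end_ fuel t layer nxt seen) :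
    ∀ (cands : List Int) (t1 : Int) (layerL nxtL : List Int) (v : Array Int)
      (seen : Array Bool), 0 ≤ t1 → Align end_ t1 layerL nxtL v seen →
      2 * unvis v + layerL.length + nxtL.length < fuel →
      bfsLoop end_ fuel
          ((cands.foldl (pushA (t1 + 1))
            (⟨layerL.map (fun x => (x, t1)), nxtL.map (fun x => (x, t1 + 1))⟩, v)).1)
          ((cands.foldl (pushA (t1 + 1))
            (⟨layerL.map (fun x => (x, t1)), nxtL.map (fun x => (x, t1 + 1))⟩, v)).2)
        = AltRes end_ fuel t1 layerL (walkB end_ t1 cands (nxtL, seen)) := by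
  intro cands
  induction cands with
  | nil =>
    intro t1 layerL nxtL v seen ht hrel hm
    simp only [List.foldl_nil, walkB_nil, AltRes]
    exact IH t1 layerL nxtL v seen ht hrel hm
  | cons n rest ih2 =>
    intro t1 layerL nxtL v seen ht hrel hm
    obtain ⟨hsv, hss, hq, hf, hend⟩ := hrel
    rw [walkB_cons, List.foldl_cons]
    by_cases hnr : 0 ≤ n ∧ n ≤ 100000
    · have hflag := hf n hnr
      by_cases hv : vGet v n = -1
      · -- the walk push fires on both sides
        have hga : 0 ≤ n ∧ n ≤ 100000 ∧ vGet v n = -1 := ⟨hnr.1, hnr.2, hv⟩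
        have hgb : 0 ≤ n ∧ n ≤ 100000 ∧ bGet seen n = false :=
          ⟨hnr.1, hnr.2, hflag.2 hv⟩
        rw [if_pos hgb]
        simp only [pushA, if_pos hga]
        have hmark := unvis_vSet hsv hnr (a := t1 + 1) hv (by omega)
        have hq' : InvQ
            (DQ.pushRight ⟨layerL.map (fun x => (x, t1)), nxtL.map (fun x => (x, t1 + 1))⟩
              (n, t1 + 1)) (vSet v n (t1 + 1)) :=
          InvQ_pushRight (InvQ_mark hq hsv hnr hv) hnr
            (vGet_vSet_self (t1 + 1) hsv hnr) (by omega)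
        by_cases he : n = end_
        · -- target discovered: B returns t1+1, A returns it after draining
          rw [if_pos he]
          simp only [AltRes]
          have hfold := foldA_pres (by omega : (0:Int) ≤ t1 + 1) rest
            (DQ.pushRight ⟨layerL.map (fun x => (x, t1)), nxtL.map (fun x => (x, t1 + 1))⟩
              (n, t1 + 1), vSet v n (t1 + 1))
            (by rw [size_vSet, hsv])
          obtain ⟨hf1, hf2, hf3, hf4, hf5⟩ := hfold
          refine loopA_pending end_ (t1 + 1) (by omega) (he ▸ hnr) fuel _ _
            (by rw [hf1, size_vSet, hsv]) (hf2 hq') ?_ ?_ ?_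
          · rw [hf3 end_ (he ▸ hnr)
              (by rw [← he, vGet_vSet_self (t1 + 1) hsv hnr]; omega),
              ← he, vGet_vSet_self (t1 + 1) hsv hnr]
          · refine hf4 _ ?_
            rw [← he, Items_pushRight]
            exact List.mem_append_right _ (List.mem_singleton_self _)
          · refine lt_of_le_of_lt hf5 ?_
            rw [Items_pushRight, List.length_append, length_Items_aligned]
            simp only [List.length_singleton]
            omega
        · -- marked and queued on both sides, continue with the next candidate
          rw [if_neg he]
          have halign : Align end_ t1 layerL (n :: nxtL) (vSet v n (t1 + 1)) (bSet seen n) := by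
            refine ⟨by rw [size_vSet, hsv], by rw [size_bSet, hss], ?_, ?_, ?_⟩
            · exact hq'
            · exact FSync_mark hf hsv hss hnr (by omega)
            · intro hre
              have hne : end_ ≠ n := fun hcontra => he hcontra.symm
              rw [vGet_vSet_ne (t1 + 1) hnr hre hne]
              exact hend hre
          have := ih2 t1 layerL (n :: nxtL) (vSet v n (t1 + 1)) (bSet seen n) ht halign
            (by rw [List.length_cons]; omega)
          simpa using this
      · -- cell already marked: no push on either side
        have hgb : ¬(0 ≤ n ∧ n ≤ 100000 ∧ bGet seen n = false) := by
          intro hc; exact hv (hflag.1 hc.2.2)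
        have hga : ¬(0 ≤ n ∧ n ≤ 100000 ∧ vGet v n = -1) := by
          intro hc; exact hv hc.2.2
        rw [if_neg hgb]
        simp only [pushA, if_neg hga]
        exact ih2 t1 layerL nxtL v seen ht ⟨hsv, hss, hq, hf, hend⟩ hm
    · -- out of range: no push on either side
      have hgb : ¬(0 ≤ n ∧ n ≤ 100000 ∧ bGet seen n = false) := by
        intro hc; exact hnr ⟨hc.1, hc.2.1⟩
      have hga : ¬(0 ≤ n ∧ n ≤ 100000 ∧ vGet v n = -1) := by
        intro hc; exact hnr ⟨hc.1, hc.2.1⟩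
      rw [if_neg hgb]
      simp only [pushA, if_neg hga]
      exact ih2 t1 layerL nxtL v seen ht ⟨hsv, hss, hq, hf, hend⟩ hm

-- One full iteration, after alignment of the pop.
theorem loop_corr (end_ : Int) :
    ∀ (fuel : Nat) (t : Int) (layer nxt : List Int) (v : Array Int) (seen : Array Bool),
      0 ≤ t → Align end_ t layer nxt v seen →
      2 * unvis v + layer.length + nxt.length < fuel →
      bfsLoop end_ fuel ⟨layer.map (fun x => (x, t)), nxt.map (fun x => (x, t + 1))⟩ v
        = bfsAltLoop end_ fuel t layer nxt seen := by
  intro fuel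
  induction fuel with
  | zero =>
    intro t layer nxt v seen _ _ hm
    exact absurd hm (Nat.not_lt_zero _)
  | succ fuel ih =>
    -- one aligned iteration, common to the direct pop and the promoted pop
    have hbody : ∀ (t1 cur : Int) (restL nxtL : List Int) (v : Array Int) (seen : Array Bool),
        0 ≤ t1 →
        Align end_ t1 (cur :: restL) nxtL v seen →
        2 * unvis v + (cur :: restL).length + nxtL.length < fuel + 1 →
        bfsLoop end_ (fuel + 1)
            ⟨((cur :: restL).map (fun x => (x, t1))), nxtL.map (fun x => (x, t1 + 1))⟩ v
          = bfsAltLoop end_ (fuel + 1) t1 (cur :: restL) nxtL seen := by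
      intro t1 cur restL nxtL v seen ht hrel hm
      obtain ⟨hsv, hss, hq, hf, hend⟩ := hrel
      have hhead := hq (cur, t1) (by
        rw [Items_aligned, List.map_cons]
        exact List.mem_append_left _ List.mem_cons_self)
      have hcur : InR cur := hhead.1
      have hvcur : vGet v cur = t1 := hhead.2.1
      have hq1 : InvQ ⟨restL.map (fun x => (x, t1)), nxtL.map (fun x => (x, t1 + 1))⟩ v := by
        intro p hp
        refine hq p ?_
        rw [Items_aligned, List.map_cons]
        rw [Items_aligned] at hp
        exact List.mem_cons_of_mem _ hp
      have hmlen : 2 * unvis v + restL.length + nxtL.length < fuel := by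
        rw [List.length_cons] at hm; omega
      have hpop : DQ.popLeft?
          ⟨((cur :: restL).map (fun x => (x, t1))), nxtL.map (fun x => (x, t1 + 1))⟩ =
          some ((cur, t1), ⟨restL.map (fun x => (x, t1)), nxtL.map (fun x => (x, t1 + 1))⟩) := rfl
      rw [bfsLoop_pop hpop, bfsAltLoop_cons]
      have hne : ¬ cur = end_ := by
        intro he
        have := hend (he ▸ hcur)
        rw [he, this] at hvcur; omega
      rw [if_neg hne]
      by_cases hnr : 0 ≤ cur * 2 ∧ cur * 2 ≤ 100000
      · have hflag := hf (cur * 2) hnr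
        by_cases hv : vGet v (cur * 2) = -1
        · have hga : 0 ≤ cur * 2 ∧ cur * 2 ≤ 100000 ∧ vGet v (cur * 2) = -1 := ⟨hnr.1, hnr.2, hv⟩
          have hgb : 0 ≤ cur * 2 ∧ cur * 2 ≤ 100000 ∧ bGet seen (cur * 2) = false :=
            ⟨hnr.1, hnr.2, hflag.2 hv⟩
          rw [if_pos hgb]
          simp only [if_pos hga]
          have hmark := unvis_vSet hsv hnr (a := t1) hv (by omega)
          have hq2 : InvQ
              (DQ.pushLeft ⟨restL.map (fun x => (x, t1)), nxtL.map (fun x => (x, t1 + 1))⟩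
                (cur * 2, t1)) (vSet v (cur * 2) t1) :=
            InvQ_pushLeft (InvQ_mark hq1 hsv hnr hv) hnr
              (vGet_vSet_self t1 hsv hnr) ht
          by_cases he2 : cur * 2 = end_
          · -- target discovered by the teleport: B returns t1, A drains to it
            rw [if_pos he2]
            have hfold := foldA_pres (by omega : (0:Int) ≤ t1 + 1) [cur - 1, cur + 1]
              (DQ.pushLeft ⟨restL.map (fun x => (x, t1)), nxtL.map (fun x => (x, t1 + 1))⟩
                (cur * 2, t1), vSet v (cur * 2) t1)
              (by rw [size_vSet, hsv])
            obtain ⟨hf1, hf2, hf3, hf4, hf5⟩ := hfold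
            refine loopA_pending end_ t1 ht (he2 ▸ hnr) fuel _ _
              (by rw [hf1, size_vSet, hsv]) (hf2 hq2) ?_ ?_ ?_
            · rw [hf3 end_ (he2 ▸ hnr)
                (by rw [← he2, vGet_vSet_self t1 hsv hnr]; omega),
                ← he2, vGet_vSet_self t1 hsv hnr]
            · refine hf4 _ ?_
              rw [← he2, Items_pushLeft]
              exact List.mem_cons_self
            · refine lt_of_le_of_lt hf5 ?_
              simp [Items_pushLeft, length_Items_aligned]
              omega
          · -- teleport queued on both sides, then the two walk pushes
            rw [if_neg he2]
            have halign : Align end_ t1 (cur * 2 :: restL) nxtL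
                (vSet v (cur * 2) t1) (bSet seen (cur * 2)) := by
              refine ⟨by rw [size_vSet, hsv], by rw [size_bSet, hss], hq2, ?_, ?_⟩
              · exact FSync_mark hf hsv hss hnr (by omega)
              · intro hre
                have hne2 : end_ ≠ cur * 2 := fun hcontra => he2 hcontra.symm
                rw [vGet_vSet_ne t1 hnr hre hne2]
                exact hend hre
            have := walk_corr end_ fuel ih [cur - 1, cur + 1] t1 (cur * 2 :: restL) nxtL
              (vSet v (cur * 2) t1) (bSet seen (cur * 2)) ht halign
              (by rw [List.length_cons]; omega)
            simpa using this
        · have hgb : ¬(0 ≤ cur * 2 ∧ cur * 2 ≤ 100000 ∧ bGet seen (cur * 2) = false) := by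
            intro hc; exact hv (hflag.1 hc.2.2)
          have hga : ¬(0 ≤ cur * 2 ∧ cur * 2 ≤ 100000 ∧ vGet v (cur * 2) = -1) := by
            intro hc; exact hv hc.2.2
          rw [if_neg hgb]
          simp only [if_neg hga]
          exact walk_corr end_ fuel ih [cur - 1, cur + 1] t1 restL nxtL v seen ht
            ⟨hsv, hss, hq1, hf, hend⟩ hmlen
      · have hgb : ¬(0 ≤ cur * 2 ∧ cur * 2 ≤ 100000 ∧ bGet seen (cur * 2) = false) := by
          intro hc; exact hnr ⟨hc.1, hc.2.1⟩
        have hga : ¬(0 ≤ cur * 2 ∧ cur * 2 ≤ 100000 ∧ vGet v (cur * 2) = -1) := by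
          intro hc; exact hnr ⟨hc.1, hc.2.1⟩
        rw [if_neg hgb]
        simp only [if_neg hga]
        exact walk_corr end_ fuel ih [cur - 1, cur + 1] t1 restL nxtL v seen ht
          ⟨hsv, hss, hq1, hf, hend⟩ hmlen
    intro t layer nxt v seen ht hrel hm
    cases layer with
    | cons cur restL => exact hbody t cur restL nxt v seen ht hrel hm
    | nil =>
      -- promotion on both sides, at unchanged fuel
      rw [List.map_nil, bfsLoop_rebalance, bfsAltLoop_promote,
        ← List.map_reverse]
      cases hnx : nxt.reverse with
      | nil =>
        simp only [List.map_nil]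
        rw [bfsLoop_none (by simp [DQ.popLeft?])]
        rfl
      | cons c restL =>
        obtain ⟨hsv, hss, hq, hf, hend⟩ := hrel
        have halign : Align end_ (t + 1) (c :: restL) [] v seen := by
          refine ⟨hsv, hss, ?_, hf, hend⟩
          intro p hp
          refine hq p ?_
          rw [Items_aligned] at hp ⊢
          simp only [List.map_nil, List.nil_append, List.reverse_nil, List.append_nil] at hp ⊢
          rw [← List.map_reverse, hnx]
          exact hp
        have hm' : 2 * unvis v + (c :: restL).length + ([] : List Int).length < fuel + 1 := by
          have : (c :: restL).length = nxt.length := by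
            rw [← hnx, List.length_reverse]
          rw [this]
          simpa using hm
        have := hbody (t + 1) c restL [] v seen (by omega) halign hm'
        simpa using this


-- Facts about the freshly initialised arrays.
theorem vGet_replicate {x : Int} (hx : InR x) :
    vGet (Array.replicate 100001 (-1 : Int)) x = -1 := by
  simp [vGet, Array.getD_eq_getD_getElem?, pvIdx_lt hx]

theorem bGet_replicate {x : Int} (hx : InR x) :
    bGet (Array.replicate 100001 false) x = false := by
  simp [bGet, Array.getD_eq_getD_getElem?, pvIdx_lt hx]

theorem unvis_replicate : unvis (Array.replicate 100001 (-1 : Int)) = 100001 := by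
  unfold unvis
  rw [Array.toList_replicate, List.count_replicate]
  simp

-- ===== VERDICT (by name: the statement is the Claim_ definition above) =====
theorem bfs_spec : Claim_equal_bfs := by
  unfold Claim_equal_bfs
  intro start end_ _hdom hpre
  unfold Spec_bfs
  obtain ⟨hp1, hp2⟩ := hpre
  have hs : InR start := ⟨hp1, hp2⟩
  have hrepv : (Array.replicate 100001 (-1 : Int)).size = 100001 := Array.size_replicate
  have hreps : (Array.replicate 100001 false).size = 100001 := Array.size_replicate
  by_cases hse : start = end_
  · subst hse
    simp only [bfs, bfs_alt]
    rw [show (300005 : Nat) = 300004 + 1 from rfl,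
      bfsLoop_pop (cur := start) (cnt := 0) (q1 := ⟨[], []⟩) rfl, if_pos rfl]
    simp
  · simp only [bfs, bfs_alt, if_neg hse]
    have hq0 : InvQ ⟨[(start, 0)], []⟩ (vSet (Array.replicate 100001 (-1 : Int)) start 0) := by
      intro p hp
      have : p = (start, 0) := by simpa [Items] using hp
      subst this
      exact ⟨hs, vGet_vSet_self 0 hrepv hs, le_refl _⟩
    have hf0 : FSync (vSet (Array.replicate 100001 (-1 : Int)) start 0)
        (bSet (Array.replicate 100001 false) start) := by
      intro x hx
      by_cases hxs : x = start
      · subst hxs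
        rw [bGet_bSet_self hreps hx, vGet_vSet_self 0 hrepv hx]
        simp
      · rw [bGet_bSet_ne hs hx hxs, vGet_vSet_ne 0 hs hx hxs,
          bGet_replicate hx, vGet_replicate hx]
        simp
    have hend0 : InR end_ → vGet (vSet (Array.replicate 100001 (-1 : Int)) start 0) end_ = -1 := by
      intro hre
      rw [vGet_vSet_ne 0 hs hre (fun h => hse h.symm), vGet_replicate hre]
    have hu0 : unvis (vSet (Array.replicate 100001 (-1 : Int)) start 0) = 100000 := by
      have := unvis_vSet hrepv hs (vGet_replicate hs) (by omega : (0:Int) ≠ -1)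
      rw [unvis_replicate] at this
      omega
    have halign : Align end_ 0 [start] [] (vSet (Array.replicate 100001 (-1 : Int)) start 0)
        (bSet (Array.replicate 100001 false) start) :=
      ⟨by rw [size_vSet, hrepv], by rw [size_bSet, hreps], hq0, hf0, hend0⟩
    have := loop_corr end_ 300005 0 [start] []
      (vSet (Array.replicate 100001 (-1 : Int)) start 0)
      (bSet (Array.replicate 100001 false) start) le_rfl halign
      (by rw [hu0]; norm_num)
    simpa using this
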